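-- pv_equiv track=rewrite | github.com/allan-tulane/sp22-recitation-05-jhartman00 | main.py | construct_output
-- ===== SOURCE A (Python) =====
-- def construct_output(a, positions):
--     """
--     Construct the final, sorted output.
--
--     Params:
--       a...........input list
--       positions...list of first location of each value in the output.
--
--     Returns:
--       sorted version of a
--
--     >>> construct_output([2,2,1,0,1,0,1,3], [0, 2, 5, 7])
--     [0,0,1,1,1,2,2,3]
--     """
--     counts = [0] * len(positions)
--     out = [0] * len(a)
--     for i in a:
--         pos = positions[i] + counts[i]
--         out[pos] = i
--         counts[i] += 1
--     return out
-- ===== SOURCE B (Python) =====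
-- def construct_output(a, positions):
--     buckets = [[] for _ in positions]
--     for x in a:
--         buckets[x].append(x)
--     out = [0] * len(a)
--     for v in range(len(positions)):
--         base = positions[v]
--         for k, elem in enumerate(buckets[v]):
--             out[base + k] = elem
--     return out
-- ===== Notes on version B (the rewrite author's own statement) =====
-- stated objective: alternative
-- what changed: Replaces the single pass that threads a running per-value counts array with a two-phase distribute/gather: elements are first dropped into per-value buckets, then each bucket is written out contiguously from its base position.
-- outside the precondition, e.g. on construct_output([1, 0], [0, 0]): A returns [0, 0], B returns [1, 0]
import Mathlib
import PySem

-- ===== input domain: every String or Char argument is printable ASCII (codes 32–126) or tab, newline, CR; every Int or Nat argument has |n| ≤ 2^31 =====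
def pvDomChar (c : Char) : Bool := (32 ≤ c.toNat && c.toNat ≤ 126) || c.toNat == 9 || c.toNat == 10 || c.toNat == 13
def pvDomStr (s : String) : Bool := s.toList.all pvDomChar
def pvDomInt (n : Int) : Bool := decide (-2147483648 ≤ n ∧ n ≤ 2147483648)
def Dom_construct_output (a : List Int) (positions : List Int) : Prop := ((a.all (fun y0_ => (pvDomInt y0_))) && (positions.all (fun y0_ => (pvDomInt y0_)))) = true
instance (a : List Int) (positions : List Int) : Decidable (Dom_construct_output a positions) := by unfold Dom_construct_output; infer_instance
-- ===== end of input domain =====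

-- B replaces A's single counting pass (running counts array) with a distribute/gather bucket pass; equal results proved on Pre_ (in-range, non-overlapping placements).

-- ===== PORT A =====
-- loop body of A: pos = positions[i] + counts[i]; out[pos] = i; counts[i] += 1
def coStepA (positions : List Int) (st : List Int × List Int) (i : Int) : List Int × List Int :=
  (PySem.List.pySetD st.1 i (PySem.List.pyGetD st.1 i 0 + 1),
   PySem.List.pySetD st.2 (PySem.List.pyGetD positions i 0 + PySem.List.pyGetD st.1 i 0) i)

def construct_output (a : List Int) (positions : List Int) : List Int :=
  (a.foldl (coStepA positions)
    (List.replicate positions.length 0, List.replicate a.length 0)).2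

-- ===== PORT B =====
-- distribute phase: buckets[x].append(x)
def coDistrib (bs : List (List Int)) (x : Int) : List (List Int) :=
  PySem.List.pySetD bs x (PySem.List.pyGetD bs x [] ++ [x])

-- gather inner write: out[base + k] = elem
def coWrite (base : Int) (o : List Int) (ke : Int × Int) : List Int :=
  PySem.List.pySetD o (base + ke.1) ke.2

-- gather phase for one value v: for k, elem in enumerate(buckets[v]): out[base+k] = elem
def coGather (positions : List Int) (buckets : List (List Int)) (o : List Int) (v : Int) : List Int :=
  (PySem.List.enumerate (PySem.List.pyGetD buckets v []) 0).foldl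
    (coWrite (PySem.List.pyGetD positions v 0)) o

def construct_output_alt (a : List Int) (positions : List Int) : List Int :=
  (PySem.List.pyRange 0 (positions.length : Int) 1).foldl
    (coGather positions (a.foldl coDistrib (positions.map fun _ => ([] : List Int))))
    (List.replicate a.length 0)

-- ===== PRECONDITION & SPEC =====
-- Helper definitions used by Pre_ (closed-form conditions on the inputs only).
-- coIdx m x : the list cell Python index x denotes in a list of length m (negative wraps).
def coIdx (m : Nat) (x : Int) : Nat := (if x < 0 then x + m else x).toNat

-- coBucket l m v : the elements of l that Python index-normalise to cell v.
def coBucket (l : List Int) (m : Nat) (v : Nat) : List Int :=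
  l.filter (fun x => decide (coIdx m x = v))

-- coK? base cnt nI p : the write offset k < cnt whose write position base+k lands on cell p
-- of a length-nI output (positions wrap once), if any.
def coK? (base cnt nI p : Int) : Option Int :=
  if base ≤ p ∧ p < base + cnt then some (p - base)
  else if base ≤ p - nI ∧ p - nI < base + cnt then some (p - nI - base)
  else none

-- cell p is written while placing value-class v
def coPred (l positions : List Int) (n p v : Nat) : Bool :=
  (coK? (positions.getD v 0) ((coBucket l positions.length v).length : Int)
    (n : Int) (p : Int)).isSome

-- Pre_ admits every input on which A returns except those whose per-value write ranges
-- OVERLAP on some output cell: there the result is an accident of A's write order (B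
-- gathers bucket by bucket), a corner no caller of a counting-sort helper specifies.
-- Wrapped (negative) element indexes and write positions are admitted and proved equal.
def Pre_construct_output (a : List Int) (positions : List Int) : Prop :=
  (∀ x ∈ a, -(positions.length : Int) ≤ x ∧ x < (positions.length : Int)) ∧
  (∀ v : Nat, v < positions.length → 0 < (coBucket a positions.length v).length →
      -(a.length : Int) ≤ positions.getD v 0 ∧
      positions.getD v 0 + ((coBucket a positions.length v).length : Int) ≤ (a.length : Int)) ∧
  (∀ v ∈ List.range positions.length, ∀ w ∈ List.range positions.length, v ≠ w →
      ∀ p ∈ List.range a.length,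
        ¬(coPred a positions a.length p v = true ∧ coPred a positions a.length p w = true))

instance (a : List Int) (positions : List Int) : Decidable (Pre_construct_output a positions) := by
  unfold Pre_construct_output; infer_instance

def pvWitness_construct_output : List Int × List Int := ([2, 2, 1, 0, 1, 0, 1, 3], [0, 2, 5, 7])

def Spec_construct_output (a : List Int) (positions : List Int) (out : List Int) : Prop :=
  out = construct_output_alt a positions
instance (a : List Int) (positions : List Int) (out : List Int) : Decidable (Spec_construct_output a positions out) := by
  unfold Spec_construct_output; infer_instance

-- ===== CLAIM (what is proved, stated in full; the proofs are below) =====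
def Claim_equal_construct_output : Prop := ∀ (a : List Int) (positions : List Int), Dom_construct_output a positions → Pre_construct_output a positions → Spec_construct_output a positions (construct_output a positions)

-- ===== LEMMAS AND PROOFS =====

-- the value placed on cell p when the bucket bkt is written starting at base (dflt if none)
def coVal (bkt : List Int) (base nI p dflt : Int) : Int :=
  if base ≤ p ∧ p < base + bkt.length then bkt.getD (p - base).toNat 0
  else if base ≤ p - nI ∧ p - nI < base + bkt.length then bkt.getD (p - nI - base).toNat 0
  else dflt

-- the value both programs leave in cell p after value classes 0..V-1 (with bucket contents
-- taken from l) have been placed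
def coSpecVal (l positions : List Int) (n V p : Nat) : Int :=
  match (List.range V).find? (coPred l positions n p) with
  | some v => coVal (coBucket l positions.length v) (positions.getD v 0) (n : Int) (p : Int) 0
  | none => 0

lemma coIdx_spec (m : Nat) (x : Int) (h0 : -(m : Int) ≤ x) (h1 : x < m) :
    coIdx m x < m ∧ ((coIdx m x : Int) = x ∨ (coIdx m x : Int) = x + m) := by
  unfold coIdx
  split_ifs <;> constructor <;> omega

lemma pyGetD_wrap {α : Type} (xs : List α) (x : Int) (d : α)
    (h0 : -(xs.length : Int) ≤ x) (h1 : x < xs.length) :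
    PySem.List.pyGetD xs x d = xs.getD (coIdx xs.length x) d := by
  unfold coIdx
  split_ifs with h
  · unfold PySem.List.pyGetD PySem.List.pyGet? PySem.List.pyIdx?
    split_ifs <;> simp_all <;> try omega
    have heq : xs.length - (-x).toNat = (x + (xs.length : Int)).toNat := by omega
    rw [heq]
  · rw [PySem.List.pyGetD_of_nonneg _ _ (by omega)]

lemma pySetD_wrap {α : Type} (xs : List α) (x : Int) (v : α)
    (h0 : -(xs.length : Int) ≤ x) (h1 : x < xs.length) :
    PySem.List.pySetD xs x v = xs.set (coIdx xs.length x) v := by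
  unfold coIdx
  split_ifs with h
  · unfold PySem.List.pySetD PySem.List.pySet? PySem.List.pyIdx?
    split_ifs <;> simp_all <;> try omega
    have heq : xs.length - (-x).toNat = (x + (xs.length : Int)).toNat := by omega
    rw [heq]
  · rw [PySem.List.pySetD_of_nonneg _ _ (by omega)]

lemma getD_set_if {α : Type} (xs : List α) (d : α) (j : Nat) (v : α) (p : Nat)
    (hp : p < xs.length) :
    (xs.set j v).getD p d = if p = j then v else xs.getD p d := by
  rw [List.getD_eq_getElem _ _ (by simpa using hp), List.getElem_set,
    List.getD_eq_getElem _ _ hp]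
  rcases eq_or_ne p j with h | h
  · simp [h]
  · simp [h, Ne.symm h]

lemma coBucket_append_singleton (l : List Int) (m : Nat) (x : Int) (v : Nat) :
    coBucket (l ++ [x]) m v = coBucket l m v ++ if coIdx m x = v then [x] else [] := by
  unfold coBucket
  rw [List.filter_append]
  congr 1
  split_ifs with h <;> simp [h]

lemma coPred_iff (l positions : List Int) (n p v : Nat) :
    coPred l positions n p v = true ↔
      ((positions.getD v 0 ≤ (p : Int) ∧
        (p : Int) < positions.getD v 0 + ((coBucket l positions.length v).length : Int)) ∨
       (positions.getD v 0 ≤ (p : Int) - (n : Int) ∧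
        (p : Int) - (n : Int) < positions.getD v 0 + ((coBucket l positions.length v).length : Int))) := by
  unfold coPred coK?
  split_ifs with h1 h2 <;> simp_all

lemma coPred_unique (a positions l : List Int)
    (hPre : Pre_construct_output a positions)
    (hle : ∀ v : Nat, v < positions.length →
      (coBucket l positions.length v).length ≤ (coBucket a positions.length v).length)
    (p v w : Nat) (hp : p < a.length)
    (hv : v < positions.length) (hw : w < positions.length)
    (hpv : coPred l positions a.length p v = true)
    (hpw : coPred l positions a.length p w = true) : v = w := by
  by_contra hne
  rw [coPred_iff] at hpv hpw
  have h1 := hle v hv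
  have h2 := hle w hw
  exact hPre.2.2 v (List.mem_range.mpr hv) w (List.mem_range.mpr hw) hne p
    (List.mem_range.mpr hp)
    ⟨(coPred_iff a positions a.length p v).mpr (by omega),
     (coPred_iff a positions a.length p w).mpr (by omega)⟩

lemma find?_congr_int {f g : Nat → Bool} : ∀ (l : List Nat), (∀ x ∈ l, f x = g x) →
    l.find? f = l.find? g := by
  intro l h
  induction l with
  | nil => rfl
  | cons x xs ih =>
    simp only [List.find?_cons, h x (by simp)]
    cases g x
    · exact ih (fun y hy => h y (by simp [hy]))
    · rfl

lemma find?_range_eq_some {f : Nat → Bool} (V v : Nat) (hv : v < V) (hf : f v = true)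
    (huniq : ∀ w, w < V → f w = true → w = v) :
    (List.range V).find? f = some v := by
  cases h : (List.range V).find? f with
  | none => exact absurd hf (by simpa using List.find?_eq_none.mp h v (List.mem_range.mpr hv))
  | some w =>
    have hw := List.find?_some h
    have hwm := List.mem_range.mp (List.mem_of_find?_eq_some h)
    rw [huniq w hwm hw]

lemma coSpecVal_succ_of_false (l positions : List Int) (n V p : Nat)
    (h : coPred l positions n p V = false) :
    coSpecVal l positions n (V + 1) p = coSpecVal l positions n V p := by
  unfold coSpecVal
  rw [List.range_succ, List.find?_append]
  simp [List.find?, h]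

lemma coSpecVal_zero_bucket (positions : List Int) (n V p : Nat) :
    coSpecVal [] positions n V p = 0 := by
  unfold coSpecVal
  rw [List.find?_eq_none.mpr]
  intro w _
  simp only [coPred, coBucket, List.filter_nil, List.length_nil, Nat.cast_zero, coK?]
  split_ifs <;> simp_all <;> omega
lemma getD_append_lt (l l2 : List Int) (k : Nat) (hk : k < l.length) :
    (l ++ l2).getD k 0 = l.getD k 0 := by
  rw [List.getD_eq_getElem _ _ (by simp; omega), List.getD_eq_getElem _ _ hk,
    List.getElem_append_left hk]

lemma getD_append_length (l : List Int) (x : Int) : (l ++ [x]).getD l.length 0 = x := by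
  rw [List.getD_eq_getElem _ _ (by simp)]
  simp

lemma coPred_congr_len (l1 l2 positions : List Int) (n p v : Nat)
    (h : (coBucket l1 positions.length v).length = (coBucket l2 positions.length v).length) :
    coPred l1 positions n p v = coPred l2 positions n p v := by
  unfold coPred
  rw [h]

lemma foldWrite_invariant (base : Int) (n : Nat) (hb : -(n : Int) ≤ base) :
    ∀ (bkt : List Int) (s : Nat) (o : List Int), o.length = n →
      base + (s : Int) + (bkt.length : Int) ≤ (n : Int) → bkt.length ≤ n →
      ((PySem.List.enumerate bkt (s : Int)).foldl (coWrite base) o).length = n ∧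
      ∀ p : Nat, p < n →
        ((PySem.List.enumerate bkt (s : Int)).foldl (coWrite base) o).getD p 0 =
          coVal bkt (base + (s : Int)) (n : Int) (p : Int) (o.getD p 0) := by
  intro bkt
  induction bkt with
  | nil =>
    intro s o hlen hle _
    simp only [PySem.List.enumerate_nil, List.foldl_nil]
    refine ⟨hlen, fun p hp => ?_⟩
    unfold coVal
    simp only [List.length_nil, Nat.cast_zero]
    rw [if_neg (by omega), if_neg (by omega)]
  | cons x rest ih =>
    intro s o hlen hle hbn
    simp only [PySem.List.enumerate_cons, List.foldl_cons]
    have hrl : (rest.length : Int) + 1 ≤ n := by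
      simp only [List.length_cons] at hbn
      omega
    have hposlo : -(n : Int) ≤ base + (s : Int) := by omega
    have hposhi : base + (s : Int) < n := by
      simp only [List.length_cons] at hle
      push_cast at hle
      omega
    obtain ⟨hjlt, hjeq⟩ := coIdx_spec n (base + (s : Int)) hposlo hposhi
    have hw : coWrite base o ((s : Int), x) = o.set (coIdx n (base + (s : Int))) x := by
      unfold coWrite
      rw [pySetD_wrap o _ x (by rw [hlen]; omega) (by rw [hlen]; exact_mod_cast hposhi), hlen]
    rw [hw]
    have hcast : (s : Int) + 1 = ((s + 1 : Nat) : Int) := by push_cast; ring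
    rw [hcast]
    obtain ⟨L, H⟩ := ih (s + 1) (o.set (coIdx n (base + (s : Int))) x)
      (by rw [List.length_set]; exact hlen)
      (by simp only [List.length_cons] at hle; push_cast at hle ⊢; omega)
      (by simp only [List.length_cons] at hbn; omega)
    refine ⟨L, fun p hp => ?_⟩
    rw [H p hp, getD_set_if _ _ _ _ _ (by omega)]
    unfold coVal
    simp only [List.length_cons]
    push_cast
    split_ifs <;>
      first
        | rfl
        | (exfalso; omega)
        | (rw [show ((p : Int) - (base + (s : Int))).toNat =
              ((p : Int) - (base + ((s : Int) + 1))).toNat + 1 from by omega,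
            List.getD_cons_succ])
        | (rw [show ((p : Int) - (n : Int) - (base + (s : Int))).toNat =
              ((p : Int) - (n : Int) - (base + ((s : Int) + 1))).toNat + 1 from by omega,
            List.getD_cons_succ])
        | (rw [show ((p : Int) - (base + (s : Int))).toNat = 0 from by omega,
            List.getD_cons_zero])
        | (rw [show ((p : Int) - (n : Int) - (base + (s : Int))).toNat = 0 from by omega,
            List.getD_cons_zero])
lemma foldDistrib_invariant (a positions : List Int)
    (hEl : ∀ x ∈ a, -(positions.length : Int) ≤ x ∧ x < (positions.length : Int)) :
    ∀ (suf pre : List Int) (bs : List (List Int)),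
      a = pre ++ suf →
      bs.length = positions.length →
      (∀ v : Nat, v < positions.length → bs.getD v [] = coBucket pre positions.length v) →
      (suf.foldl coDistrib bs).length = positions.length ∧
      ∀ v : Nat, v < positions.length →
        (suf.foldl coDistrib bs).getD v [] = coBucket a positions.length v := by
  intro suf
  induction suf with
  | nil =>
    intro pre bs ha hlen hinv
    rw [List.append_nil] at ha
    subst ha
    exact ⟨hlen, hinv⟩
  | cons i rest ih =>
    intro pre bs ha hlen hinv
    have hi_mem : i ∈ a := by rw [ha]; simp
    obtain ⟨hi0, him⟩ := hEl i hi_mem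
    obtain ⟨hNlt, _⟩ := coIdx_spec positions.length i hi0 him
    have hstep : coDistrib bs i = bs.set (coIdx positions.length i)
        (coBucket pre positions.length (coIdx positions.length i) ++ [i]) := by
      unfold coDistrib
      rw [pyGetD_wrap bs i [] (by rw [hlen]; omega) (by rw [hlen]; exact_mod_cast him),
        pySetD_wrap bs i _ (by rw [hlen]; omega) (by rw [hlen]; exact_mod_cast him), hlen,
        hinv _ hNlt]
    rw [List.foldl_cons, hstep]
    refine ih (pre ++ [i]) _ (by rw [ha, List.append_assoc]; rfl)
      (by rw [List.length_set]; exact hlen) ?_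
    intro v hv
    rw [getD_set_if _ _ _ _ _ (by omega), coBucket_append_singleton]
    rcases eq_or_ne v (coIdx positions.length i) with h | h
    · subst h
      rw [if_pos rfl, if_pos rfl]
    · rw [if_neg h, if_neg (fun he => h he.symm), List.append_nil]
      exact hinv v hv

lemma foldGather_invariant (a positions : List Int) (buckets : List (List Int))
    (hPre : Pre_construct_output a positions)
    (hB : ∀ v : Nat, v < positions.length →
      buckets.getD v [] = coBucket a positions.length v) :
    ∀ V : Nat, V ≤ positions.length →
      ((PySem.List.pyRange 0 (V : Int) 1).foldl (coGather positions buckets)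
        (List.replicate a.length 0)).length = a.length ∧
      ∀ p : Nat, p < a.length →
        ((PySem.List.pyRange 0 (V : Int) 1).foldl (coGather positions buckets)
          (List.replicate a.length 0)).getD p 0 = coSpecVal a positions a.length V p := by
  intro V
  induction V with
  | zero =>
    intro _
    simp only [Nat.cast_zero, PySem.List.pyRange_one_eq_nil (le_refl (0 : Int)), List.foldl_nil]
    refine ⟨List.length_replicate, fun p hp => ?_⟩
    rw [List.getD_replicate _ hp]
    rfl
  | succ V ih =>
    intro hV1
    obtain ⟨Lprev, Hprev⟩ := ih (by omega)
    have hVm : V < positions.length := by omega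
    have hc : ((V + 1 : Nat) : Int) = (V : Int) + 1 := by push_cast; ring
    rw [hc, PySem.List.pyRange_one_succ_right (by positivity), List.foldl_append,
      List.foldl_cons, List.foldl_nil]
    unfold coGather at Lprev Hprev ⊢
    have hbkt : PySem.List.pyGetD buckets (V : Int) [] = coBucket a positions.length V := by
      rw [PySem.List.pyGetD_natCast]; exact hB V hVm
    rw [hbkt, PySem.List.pyGetD_natCast]
    rcases Nat.eq_zero_or_pos (coBucket a positions.length V).length with hc0 | hcpos
    · have hnil : coBucket a positions.length V = [] := List.eq_nil_of_length_eq_zero hc0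
      rw [hnil]
      simp only [PySem.List.enumerate_nil, List.foldl_nil]
      refine ⟨Lprev, fun p hp => ?_⟩
      rw [Hprev p hp, coSpecVal_succ_of_false]
      unfold coPred coK?
      rw [hnil]
      simp only [List.length_nil, Nat.cast_zero]
      rw [if_neg (by omega), if_neg (by omega)]
      rfl
    · obtain ⟨hb0, hbn⟩ := hPre.2.1 V hVm hcpos
      have hcn : (coBucket a positions.length V).length ≤ a.length :=
        List.length_filter_le _ _
      obtain ⟨L, H⟩ := foldWrite_invariant (positions.getD V 0) a.length hb0
        (coBucket a positions.length V) 0 _ Lprev (by push_cast; omega)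
        (List.length_filter_le _ _)
      simp only [Nat.cast_zero, add_zero] at L H
      refine ⟨L, fun p hp => ?_⟩
      rw [H p hp, Hprev p hp]
      by_cases hpred : coPred a positions a.length p V = true
      · have huniq : ∀ w, w < V + 1 → coPred a positions a.length p w = true → w = V :=
          fun w hw hpw => coPred_unique a positions a hPre (fun _ _ => le_refl _) p w V hp
            (by omega) hVm hpw hpred
        unfold coSpecVal
        rw [find?_range_eq_some (V + 1) V (by omega) hpred huniq]
        dsimp only
        unfold coVal
        rw [coPred_iff] at hpred
        split_ifs <;> first | rfl | (exfalso; omega)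
      · have hfalse : coPred a positions a.length p V = false := by
          cases hx : coPred a positions a.length p V
          · rfl
          · exact absurd hx hpred
        rw [coSpecVal_succ_of_false _ _ _ _ _ hfalse]
        have hnot : ¬ ((positions.getD V 0 ≤ (p : Int) ∧
            (p : Int) < positions.getD V 0 + ((coBucket a positions.length V).length : Int)) ∨
            (positions.getD V 0 ≤ (p : Int) - (a.length : Int) ∧
            (p : Int) - (a.length : Int) < positions.getD V 0 + ((coBucket a positions.length V).length : Int))) := by
          rw [← coPred_iff]
          simp [hfalse]
        unfold coVal
        rw [if_neg (fun h => hnot (Or.inl h)), if_neg (fun h => hnot (Or.inr h))]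
lemma foldA_invariant (a positions : List Int) (hPre : Pre_construct_output a positions) :
    ∀ (suf pre counts out : List Int),
      a = pre ++ suf →
      counts.length = positions.length →
      out.length = a.length →
      (∀ v : Nat, v < positions.length →
        counts.getD v 0 = ((coBucket pre positions.length v).length : Int)) →
      (∀ p : Nat, p < a.length →
        out.getD p 0 = coSpecVal pre positions a.length positions.length p) →
      (suf.foldl (coStepA positions) (counts, out)).2.length = a.length ∧
      ∀ p : Nat, p < a.length →
        (suf.foldl (coStepA positions) (counts, out)).2.getD p 0 =
          coSpecVal a positions a.length positions.length p := by
  intro suf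
  induction suf with
  | nil =>
    intro pre counts out ha hclen holen hcounts hout
    rw [List.append_nil] at ha
    subst ha
    exact ⟨holen, hout⟩
  | cons i rest ih =>
    intro pre counts out ha hclen holen hcounts hout
    have ha' : a = (pre ++ [i]) ++ rest := by rw [ha, List.append_assoc]; rfl
    have hi_mem : i ∈ a := by rw [ha]; simp
    obtain ⟨hi0, him⟩ := hPre.1 i hi_mem
    obtain ⟨hNlt, hNeq⟩ := coIdx_spec positions.length i hi0 him
    -- bucket bookkeeping
    have hb' : coBucket (pre ++ [i]) positions.length (coIdx positions.length i) =
        coBucket pre positions.length (coIdx positions.length i) ++ [i] := by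
      rw [coBucket_append_singleton, if_pos rfl]
    have hbsplit : ∀ v : Nat, coBucket a positions.length v =
        coBucket (pre ++ [i]) positions.length v ++ coBucket rest positions.length v := by
      intro v
      rw [ha']
      unfold coBucket
      rw [List.filter_append]
    have hle' : ∀ v : Nat, v < positions.length →
        (coBucket (pre ++ [i]) positions.length v).length ≤
          (coBucket a positions.length v).length := by
      intro v _
      rw [hbsplit v, List.length_append]
      omega
    have hcc : (coBucket pre positions.length (coIdx positions.length i)).length + 1 ≤
        (coBucket a positions.length (coIdx positions.length i)).length := by
      have h := hle' (coIdx positions.length i) hNlt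
      rw [hb', List.length_append] at h
      simpa using h
    have hcpos : 0 < (coBucket a positions.length (coIdx positions.length i)).length := by omega
    obtain ⟨hb0, hbn⟩ := hPre.2.1 (coIdx positions.length i) hNlt hcpos
    have hcn : (coBucket pre positions.length (coIdx positions.length i)).length ≤ a.length := by
      have := List.length_filter_le (fun x => decide (coIdx positions.length x = coIdx positions.length i)) a
      unfold coBucket at hcc ⊢
      omega
    -- the write position and its cell
    have hposlo : -(a.length : Int) ≤ positions.getD (coIdx positions.length i) 0 +
        ((coBucket pre positions.length (coIdx positions.length i)).length : Int) := by omega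
    have hposhi : positions.getD (coIdx positions.length i) 0 +
        ((coBucket pre positions.length (coIdx positions.length i)).length : Int) <
        (a.length : Int) := by omega
    obtain ⟨hjlt, hjeq⟩ := coIdx_spec a.length _ hposlo hposhi
    -- the step
    have hgc : PySem.List.pyGetD counts i 0 =
        ((coBucket pre positions.length (coIdx positions.length i)).length : Int) := by
      rw [pyGetD_wrap counts i 0 (by rw [hclen]; omega) (by rw [hclen]; exact_mod_cast him),
        hclen]
      exact hcounts _ hNlt
    have hgp : PySem.List.pyGetD positions i 0 = positions.getD (coIdx positions.length i) 0 := by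
      rw [pyGetD_wrap positions i 0 (by omega) (by exact_mod_cast him)]
    have hstep : coStepA positions (counts, out) i =
        (counts.set (coIdx positions.length i)
          (((coBucket pre positions.length (coIdx positions.length i)).length : Int) + 1),
         out.set (coIdx a.length (positions.getD (coIdx positions.length i) 0 +
           ((coBucket pre positions.length (coIdx positions.length i)).length : Int))) i) := by
      unfold coStepA
      rw [hgc, hgp,
        pySetD_wrap counts i _ (by rw [hclen]; omega) (by rw [hclen]; exact_mod_cast him),
        pySetD_wrap out _ i (by rw [holen]; omega) (by rw [holen]; omega),
        hclen, holen]
    rw [List.foldl_cons, hstep]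
    apply ih (pre ++ [i])
    · exact ha'
    · rw [List.length_set]; exact hclen
    · rw [List.length_set]; exact holen
    · intro v hv
      rw [getD_set_if _ _ _ _ _ (by omega), coBucket_append_singleton]
      rcases eq_or_ne v (coIdx positions.length i) with h | h
      · subst h
        rw [if_pos rfl, if_pos rfl]
        simp only [List.length_append, List.length_cons, List.length_nil]
        push_cast
        ring
      · rw [if_neg h, if_neg (fun he => h he.symm), List.append_nil]
        exact hcounts v hv
    · intro p hp
      rw [getD_set_if _ _ _ _ _ (by omega)]
      rcases eq_or_ne p (coIdx a.length (positions.getD (coIdx positions.length i) 0 +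
          ((coBucket pre positions.length (coIdx positions.length i)).length : Int))) with h | h
      · rw [if_pos h]
        subst h
        have hpred : coPred (pre ++ [i]) positions a.length
            (coIdx a.length (positions.getD (coIdx positions.length i) 0 +
              ((coBucket pre positions.length (coIdx positions.length i)).length : Int)))
            (coIdx positions.length i) = true := by
          rw [coPred_iff, hb']
          simp only [List.length_append, List.length_cons, List.length_nil]
          push_cast
          omega
        have hfind : (List.range positions.length).find?
            (coPred (pre ++ [i]) positions a.length
              (coIdx a.length (positions.getD (coIdx positions.length i) 0 +
                ((coBucket pre positions.length (coIdx positions.length i)).length : Int)))) =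
            some (coIdx positions.length i) :=
          find?_range_eq_some _ _ hNlt hpred (fun w hw hpw =>
            coPred_unique a positions (pre ++ [i]) hPre hle' _ w _ hjlt hw hNlt hpw hpred)
        unfold coSpecVal
        rw [hfind]
        dsimp only
        rw [hb']
        unfold coVal
        simp only [List.length_append, List.length_cons, List.length_nil]
        split_ifs with h1 h2
        · rw [show ((coIdx a.length (positions.getD (coIdx positions.length i) 0 +
              ((coBucket pre positions.length (coIdx positions.length i)).length : Int)) : Int) -
              positions.getD (coIdx positions.length i) 0).toNat =
              (coBucket pre positions.length (coIdx positions.length i)).length from by omega]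
          exact (getD_append_length _ _).symm
        · rw [show ((coIdx a.length (positions.getD (coIdx positions.length i) 0 +
              ((coBucket pre positions.length (coIdx positions.length i)).length : Int)) : Int) -
              (a.length : Int) - positions.getD (coIdx positions.length i) 0).toNat =
              (coBucket pre positions.length (coIdx positions.length i)).length from by omega]
          exact (getD_append_length _ _).symm
        · exfalso
          rw [coPred_iff, hb'] at hpred
          simp only [List.length_append, List.length_cons, List.length_nil] at hpred
          push_cast at hpred
          omega
      · rw [if_neg h, hout p hp]
        -- preds agree pointwise, find? agrees, and the selected value agrees
        have hpeq : ∀ w, w < positions.length →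
            coPred (pre ++ [i]) positions a.length p w = coPred pre positions a.length p w := by
          intro w hw
          rcases eq_or_ne w (coIdx positions.length i) with hw' | hw'
          · subst hw'
            rw [Bool.eq_iff_iff, coPred_iff, coPred_iff, hb']
            simp only [List.length_append, List.length_cons, List.length_nil]
            push_cast
            omega
          · exact coPred_congr_len _ _ _ _ _ _
              (by rw [coBucket_append_singleton, if_neg (fun he => hw' he.symm), List.append_nil])
        unfold coSpecVal
        rw [find?_congr_int (List.range positions.length)
          (fun w hw => hpeq w (List.mem_range.mp hw))]
        cases hf : (List.range positions.length).find? (coPred pre positions a.length p) with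
        | none => rfl
        | some w =>
          dsimp only
          have hwlt := List.mem_range.mp (List.mem_of_find?_eq_some hf)
          have hwpred := List.find?_some hf
          rcases eq_or_ne w (coIdx positions.length i) with hw' | hw'
          · subst hw'
            rw [hb']
            unfold coVal
            simp only [List.length_append, List.length_cons, List.length_nil]
            rw [coPred_iff] at hwpred
            split_ifs with h1 h2 h3 h3 h4 <;>
              first
                | (exfalso; omega)
                | (rw [getD_append_lt _ _ _ (by omega)])
          · rw [coBucket_append_singleton, if_neg (fun he => hw' he.symm), List.append_nil]

-- ===== VERDICT (by name: the statement is the Claim_ definition above) =====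
theorem construct_output_spec : Claim_equal_construct_output := by
  intro a positions _ hPre
  unfold Spec_construct_output
  obtain ⟨LA, HA⟩ := foldA_invariant a positions hPre a [] (List.replicate positions.length 0)
    (List.replicate a.length 0) rfl List.length_replicate List.length_replicate
    (fun v hv => by rw [List.getD_replicate _ hv]; simp [coBucket])
    (fun p hp => by rw [List.getD_replicate _ hp, coSpecVal_zero_bucket])
  obtain ⟨LD, HD⟩ := foldDistrib_invariant a positions hPre.1 a [] (positions.map fun _ => [])
    rfl (by simp) (fun v hv => by
      rw [List.getD_eq_getElem _ _ (by simpa using hv), List.getElem_map]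
      simp [coBucket])
  obtain ⟨LG, HG⟩ := foldGather_invariant a positions
    (a.foldl coDistrib (positions.map fun _ => [])) hPre HD positions.length (le_refl _)
  unfold construct_output construct_output_alt
  apply List.ext_getElem
  · rw [LA, LG]
  · intro k h1 h2
    rw [← List.getD_eq_getElem _ 0 h1, ← List.getD_eq_getElem _ 0 h2,
      HA k (by omega), HG k (by omega)]
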